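-- pv_equiv track=rewrite | github.com/kevmoeman/sketchbook | sketchbook.py | swirlout
-- ===== SOURCE A (Python) =====
-- def swirlout(word):
--     #swirly word if each letter alternates being the farthest letter away
--     swirly = True
--     direction = 1
--     L = word[0]
--     R = word[0]
--     for i in range(1, len(word)):
--         direction = i%2
--         cur = word[i]
--         if direction == 1:
--             if cur < R:
--                 swirly = False
--             R = cur
--
--         if direction == 0:
--             if cur > L:
--                 swirly = False
--             L = cur
--
--     return swirly
-- ===== SOURCE B (Python) =====
-- def alternate(chars, start):
--     # characters of `chars` at positions start, start+2, start+4, ...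
--     out = []
--     i = start
--     n = len(chars)
--     while i < n:
--         out.append(chars[i])
--         i += 2
--     return out
--
--
-- def swirlout(word):
--     up = [word[0]] + alternate(word, 1)
--     down = [word[0]] + alternate(word, 2)
--     nondecr = all(a <= b for a, b in zip(up, up[1:]))
--     nonincr = all(a >= b for a, b in zip(down, down[1:]))
--     return nondecr and nonincr
-- ===== Notes on version B (the rewrite author's own statement) =====
-- stated objective: alternative
-- what changed: Replaces the single interleaved parity-branching loop over indices with two separate alternating-character extractions (up/down chains seeded by word[0]) checked for monotonicity via zip of adjacent pairs.
import Mathlib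
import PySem

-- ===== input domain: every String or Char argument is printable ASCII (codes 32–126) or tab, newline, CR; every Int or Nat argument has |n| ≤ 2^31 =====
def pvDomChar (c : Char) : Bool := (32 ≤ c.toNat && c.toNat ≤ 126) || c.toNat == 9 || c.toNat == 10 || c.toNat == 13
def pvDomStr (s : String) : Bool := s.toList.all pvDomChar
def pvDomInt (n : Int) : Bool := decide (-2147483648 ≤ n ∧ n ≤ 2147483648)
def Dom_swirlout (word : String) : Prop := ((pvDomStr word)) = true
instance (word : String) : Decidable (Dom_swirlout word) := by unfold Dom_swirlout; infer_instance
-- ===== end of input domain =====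

-- B replaces A's interleaved parity-branching loop by extracting the two alternating
-- chains (both seeded with word[0]) and checking each for monotonicity; same cost.

-- ===== PORT A =====
-- the loop body of A, reading `cs` (the word's characters); state = (swirly, L, R)
def swirloutBody (cs : List Char) (st : Bool × Char × Char) (i : Int) : Bool × Char × Char :=
  let direction := PySem.Int.mod i 2
  let cur := PySem.List.pyGetD cs i ' '   -- i ∈ range(1, len) is always in range, default unused
  let st1 := if direction = 1 then ((if cur < st.2.2 then false else st.1), st.2.1, cur) else st
  if direction = 0 then ((if cur > st1.2.1 then false else st1.1), cur, st1.2.2) else st1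

def swirlout (word : String) : Bool :=
  let cs := word.toList
  match cs with
  | [] => false   -- word[0] raises IndexError in Python; excluded by Pre_swirlout
  | c0 :: _ =>
    ((PySem.List.pyRange 1 cs.length 1).foldl (swirloutBody cs) (true, c0, c0)).1

-- ===== PORT B =====
-- alternate(chars, start): characters at positions start, start+2, ...
def alternate (cs : List Char) (i : Nat) : List Char :=
  if h : i < cs.length then cs[i] :: alternate cs (i + 2) else []
termination_by cs.length - i

-- all(a <= b for a, b in zip(ch, ch[1:]))
def nonDecr (xs : List Char) : Bool := (xs.zip xs.tail).all (fun p => decide (p.1 ≤ p.2))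
-- all(a >= b for a, b in zip(ch, ch[1:]))
def nonIncr (xs : List Char) : Bool := (xs.zip xs.tail).all (fun p => decide (p.2 ≤ p.1))

def swirlout_alt (word : String) : Bool :=
  let cs := word.toList
  match cs with
  | [] => false   -- word[0] raises IndexError in Python; excluded by Pre_swirlout
  | c0 :: _ =>
    let up := c0 :: alternate cs 1
    let down := c0 :: alternate cs 2
    nonDecr up && nonIncr down

-- ===== PRECONDITION & SPEC =====
-- A (and B) raise IndexError on the empty string (word[0]); Pre_ excludes exactly that input.
def Pre_swirlout (word : String) : Prop := word ≠ ""
instance (word : String) : Decidable (Pre_swirlout word) := by unfold Pre_swirlout; infer_instance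
def pvWitness_swirlout : String := "aba"

def Spec_swirlout (word : String) (out : Bool) : Prop := out = swirlout_alt word
instance (word : String) (out : Bool) : Decidable (Spec_swirlout word out) := by unfold Spec_swirlout; infer_instance

-- ===== CLAIM (what is proved, stated in full; the proofs are below) =====
def Claim_equal_swirlout : Prop := ∀ (word : String), Dom_swirlout word → Pre_swirlout word → Spec_swirlout word (swirlout word)

-- ===== LEMMAS AND PROOFS =====

-- every other character of a list, starting with its head (proof-side recursion)
def takeAlt : List Char → List Char
  | [] => []
  | c :: t => c :: takeAlt (t.drop 1)
termination_by l => l.length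
decreasing_by simp

theorem alternate_eq_takeAlt (cs : List Char) (i : Nat) :
    alternate cs i = takeAlt (cs.drop i) := by
  rw [alternate]
  split
  · rename_i h
    rw [List.drop_eq_getElem_cons h, takeAlt, List.drop_drop]
    rw [show i + 1 + 1 = i + 2 by omega, alternate_eq_takeAlt cs (i + 2)]
  · rename_i h
    rw [List.drop_eq_nil_of_le (by omega), takeAlt]
termination_by cs.length - i

theorem nonDecr_cons (a b : Char) (l : List Char) :
    nonDecr (a :: b :: l) = (decide (a ≤ b) && nonDecr (b :: l)) := by simp [nonDecr]
theorem nonIncr_cons (a b : Char) (l : List Char) :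
    nonIncr (a :: b :: l) = (decide (b ≤ a) && nonIncr (b :: l)) := by simp [nonIncr]

-- loopA: A's loop re-expressed over the remaining characters with a parity flag
def loopA : List Char → Bool → (Bool × Char × Char) → Bool × Char × Char
  | [], _, st => st
  | c :: t, odd, st =>
    if odd then loopA t false ((if c < st.2.2 then false else st.1), st.2.1, c)
    else loopA t true ((if c > st.2.1 then false else st.1), c, st.2.2)

theorem bridge (cs : List Char) (t : List Char) (i : Nat) (h : cs.drop i = t)
    (st : Bool × Char × Char) :
    (PySem.List.pyRange (i : Int) (cs.length : Int) 1).foldl (swirloutBody cs) st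
      = loopA t (i % 2 == 1) st := by
  induction t generalizing i st with
  | nil =>
    have hle : cs.length <= i := List.drop_eq_nil_iff.mp h
    rw [PySem.List.pyRange_one_eq_nil (by exact_mod_cast hle)]
    simp [loopA]
  | cons c t ih =>
    have hi : i < cs.length := by
      have := congrArg List.length h
      simp at this
      omega
    have hcons := List.drop_eq_getElem_cons hi
    rw [h] at hcons
    injection hcons with hget hrest
    rw [PySem.List.pyRange_one_cons (by exact_mod_cast hi), List.foldl_cons]
    rw [show ((i : Int) + 1) = ((i + 1 : Nat) : Int) by push_cast; ring]
    rw [ih (i + 1) hrest.symm]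
    have hmod : PySem.Int.mod (i : Int) 2 = ((i % 2 : Nat) : Int) := by
      rw [PySem.Int.mod, Int.fmod_eq_emod]
      norm_num
    have hgetd : PySem.List.pyGetD cs (i : Int) ' ' = c := by
      rw [PySem.List.pyGetD_natCast, List.getD_eq_getElem _ _ hi, hget]
    have hbody : swirloutBody cs st (i : Int) =
        (if i % 2 == 1 then ((if c < st.2.2 then false else st.1), st.2.1, c)
         else ((if c > st.2.1 then false else st.1), c, st.2.2)) := by
      unfold swirloutBody
      rw [hmod, hgetd]
      rcases Nat.mod_two_eq_zero_or_one i with hp | hp <;> simp [hp]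
    rw [hbody]
    have hpar : ((i + 1) % 2 == 1) = !(i % 2 == 1) := by
      rcases Nat.mod_two_eq_zero_or_one i with hp | hp <;> simp [Nat.add_mod, hp]
    rw [hpar]
    rcases Nat.mod_two_eq_zero_or_one i with hp | hp <;> simp [hp, loopA]

theorem loopA_fst (t : List Char) (odd : Bool) (sw : Bool) (L R : Char) :
    (loopA t odd (sw, L, R)).1
      = (sw && (if odd then nonDecr (R :: takeAlt t) && nonIncr (L :: takeAlt (t.drop 1))
                else nonIncr (L :: takeAlt t) && nonDecr (R :: takeAlt (t.drop 1)))) := by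
  induction t generalizing odd sw L R with
  | nil => cases odd <;> simp [loopA, nonDecr, nonIncr, takeAlt]
  | cons c t ih =>
    cases odd <;>
      simp only [loopA, if_true, if_false, Bool.false_eq_true, takeAlt, List.drop_one,
        List.drop_succ_cons, List.drop_zero, ih, nonDecr_cons, nonIncr_cons] <;>
      by_cases hc : c < L <;> by_cases hc2 : c < R <;> by_cases hs : sw <;>
        simp_all [not_lt, Bool.and_comm, Bool.and_left_comm, le_of_lt] <;> simp [← decide_not, not_lt]

-- ===== VERDICT (by name: the statement is the Claim_ definition above) =====
theorem swirlout_spec : Claim_equal_swirlout := by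
  intro word _ _
  unfold Spec_swirlout
  cases hcs : word.toList with
  | nil => simp [swirlout, swirlout_alt, hcs]
  | cons c0 rest =>
    simp only [swirlout, swirlout_alt, hcs]
    nth_rewrite 1 [show (1 : Int) = ((1 : Nat) : Int) by norm_num]
    rw [bridge (c0 :: rest) rest 1 (by simp), loopA_fst,
      alternate_eq_takeAlt, alternate_eq_takeAlt]
    simp
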